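-- pv_equiv track=rewrite | github.com/9chu/parser_gen | parser_gen.py | _trim_left_until_new_line
-- ===== SOURCE A (Python) =====
-- def _trim_left_until_new_line(text):
--     for i in range(0, len(text)):
--         ch = text[i:i+1]
--         if ch == '\n':
--             return text[i+1:]
--         elif not ch.isspace():
--             break
--     return text
-- ===== SOURCE B (Python) =====
-- def _trim_left_until_new_line(text):
--     stripped = text.lstrip()
--     prefix = text[:len(text) - len(stripped)]
--     if '\n' in prefix:
--         return text[prefix.index('\n') + 1:]
--     return text
-- ===== Notes on version B (the rewrite author's own statement) =====
-- stated objective: simpler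
-- what changed: Replaces A's explicit index loop over character positions (one-character slices tested per position) by a two-pass library decomposition: lstrip extracts the leading-whitespace prefix, then the newline is located inside that prefix with a membership test plus index and the text is cut after it.
import Mathlib
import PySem

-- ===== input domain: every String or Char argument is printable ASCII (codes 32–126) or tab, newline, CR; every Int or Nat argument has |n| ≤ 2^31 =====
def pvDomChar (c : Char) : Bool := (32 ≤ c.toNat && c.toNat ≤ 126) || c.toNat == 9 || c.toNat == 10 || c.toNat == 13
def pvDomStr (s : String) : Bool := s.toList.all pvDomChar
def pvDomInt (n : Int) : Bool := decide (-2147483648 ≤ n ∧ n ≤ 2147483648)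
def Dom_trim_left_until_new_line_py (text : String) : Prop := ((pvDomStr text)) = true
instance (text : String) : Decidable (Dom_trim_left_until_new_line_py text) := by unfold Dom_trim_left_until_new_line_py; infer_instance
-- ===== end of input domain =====

-- B replaces A's index loop by an lstrip-prefix + substring-search decomposition (simpler; same return value, proved below).

-- ===== PORT A =====
-- the for-loop of A: i is the loop index, fuel = len(text) - i the remaining iterations
def pvAgo (s : List Char) (i : Nat) : (fuel : Nat) → List Char
  | 0 => s                                            -- loop exhausted: return text
  | fuel + 1 =>
    let ch := PySem.List.slice s (some (i : Int)) (some ((i : Int) + 1))   -- ch = text[i:i+1]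
    if ch = ['\n'] then PySem.List.slice s (some ((i : Int) + 1)) none     -- return text[i+1:]
    else if !(PySem.Chars.strIsspace ch) then s                            -- break; return text
    else pvAgo s (i + 1) fuel

def trim_left_until_new_line_py (text : String) : String :=
  String.ofList (pvAgo text.toList 0 text.toList.length)

-- ===== PORT B =====
def trim_left_until_new_line_py_alt (text : String) : String :=
  let s := text.toList
  let stripped := PySem.Chars.lstrip s                                      -- text.lstrip()
  let pfx := PySem.List.slice s none (some ((s.length - stripped.length : Nat) : Int))  -- text[:len(text)-len(stripped)]
  if PySem.Chars.isIn ['\n'] pfx then                                       -- '\n' in prefix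
    String.ofList (PySem.List.slice s (some (PySem.Chars.find pfx ['\n'] + 1)) none)    -- text[prefix.index('\n')+1:]
  else text

-- ===== PRECONDITION & SPEC =====
def Spec_trim_left_until_new_line_py (text : String) (out : String) : Prop := out = trim_left_until_new_line_py_alt text
instance (text : String) (out : String) : Decidable (Spec_trim_left_until_new_line_py text out) := by unfold Spec_trim_left_until_new_line_py; infer_instance

-- ===== CLAIM (what is proved, stated in full; the proofs are below) =====
def Claim_equal_trim_left_until_new_line_py : Prop := ∀ (text : String), Dom_trim_left_until_new_line_py text → Spec_trim_left_until_new_line_py text (trim_left_until_new_line_py text)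

-- ===== LEMMAS AND PROOFS =====

-- common characterisation: `none` = "return text", `some u` = "return the tail after the first newline"
def pvG : List Char → Option (List Char)
  | [] => none
  | c :: t => if c = '\n' then some t else if PySem.Chars.isspace c then pvG t else none

theorem pvG_eq_none_iff (s : List Char) : pvG s = none ↔ '\n' ∉ s.takeWhile PySem.Chars.isspace := by
  induction s with
  | nil => simp [pvG]
  | cons c t ih =>
    by_cases hn : c = '\n'
    · subst hn; simp [pvG, PySem.Chars.isspace]
    · by_cases hs : PySem.Chars.isspace c
      · simp [pvG, hn, hs, ih, Ne.symm hn]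
      · simp [pvG, hn, hs]

theorem pvAgo_eq (s : List Char) : ∀ (n i : Nat), i + n = s.length →
    pvAgo s i n = (pvG (s.drop i)).getD s := by
  intro n
  induction n with
  | zero =>
    intro i h
    have : s.drop i = [] := List.drop_of_length_le (by omega)
    simp [pvAgo, this, pvG]
  | succ n ih =>
    intro i h
    have hi : i < s.length := by omega
    have hdrop : s.drop i = s[i] :: s.drop (i + 1) := List.drop_eq_getElem_cons hi
    have hslice : PySem.List.slice s (some (i : Int)) (some ((i : Int) + 1)) = [s[i]] := by
      have h1 : ((i : Int) + 1) = ((i + 1 : Nat) : Int) := by push_cast; ring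
      rw [h1, PySem.List.slice_natCast]
      rw [show i + 1 - i = 1 from by omega]
      rw [hdrop]; rfl
    have hfrom : PySem.List.slice s (some ((i : Int) + 1)) none = s.drop (i + 1) := by
      have h1 : ((i : Int) + 1) = ((i + 1 : Nat) : Int) := by push_cast; ring
      rw [h1, PySem.List.slice_from_natCast]
    rw [pvAgo, hslice, hdrop]
    by_cases hn : s[i] = '\n'
    · simp [hn, hfrom, pvG]
    · have hne : ¬ ([s[i]] = ['\n']) := by simpa using hn
      by_cases hs : PySem.Chars.isspace s[i]
      · have : PySem.Chars.strIsspace [s[i]] = true := by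
          simp [PySem.Chars.strIsspace, hs]
        simp only [hne, if_false, this, Bool.not_true, Bool.false_eq_true, if_false]
        rw [ih (i + 1) (by omega)]
        simp [pvG, hn, hs]
      · have : PySem.Chars.strIsspace [s[i]] = false := by
          simp [PySem.Chars.strIsspace, hs]
        simp [hne, this, pvG, hn, hs]

-- find.go on a single-character needle is idxOf with an offset
theorem pvFindGo_singleton (b : Char) : ∀ (p : List Char) (k : Nat),
    PySem.Chars.find.go [b] p k = if b ∈ p then ((k : Int) + p.idxOf b) else -1 := by
  intro p
  induction p with
  | nil => intro k; simp [PySem.Chars.find.go]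
  | cons c t ih =>
    intro k
    by_cases hb : b = c
    · subst hb
      simp [PySem.Chars.find.go, List.isPrefixOf, List.idxOf_cons_self]
    · have hpre : ([b].isPrefixOf (c :: t)) = false := by
        simp [List.isPrefixOf]; exact fun h => absurd h hb
      rw [PySem.Chars.find.go, hpre]
      simp only [Bool.false_eq_true, if_false]
      rw [ih (k + 1)]
      by_cases hm : b ∈ t
      · simp [hm, hb, List.idxOf_cons_ne _ (Ne.symm hb)]
        ring
      · simp [hm, hb]

theorem pvFind_singleton (b : Char) (p : List Char) :
    PySem.Chars.find p [b] = if b ∈ p then (p.idxOf b : Int) else -1 := by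
  rw [PySem.Chars.find, pvFindGo_singleton]
  split_ifs with h <;> simp

theorem pvIsIn_singleton (b : Char) (p : List Char) :
    PySem.Chars.isIn [b] p = (b ∈ p : Bool) := by
  rw [PySem.Chars.isIn, pvFind_singleton]
  by_cases h : b ∈ p <;> simp [h]

theorem pvPrefix_eq (s : List Char) :
    PySem.List.slice s none (some ((s.length - (PySem.Chars.lstrip s).length : Nat) : Int))
      = s.takeWhile PySem.Chars.isspace := by
  rw [PySem.List.slice_to_natCast, PySem.Chars.lstrip]
  have hcat : (s.takeWhile PySem.Chars.isspace ++ s.dropWhile PySem.Chars.isspace).length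
      = s.length := by rw [List.takeWhile_append_dropWhile]
  rw [List.length_append] at hcat
  have hlen : s.length - (s.dropWhile PySem.Chars.isspace).length
      = (s.takeWhile PySem.Chars.isspace).length := by omega
  rw [hlen, ← List.prefix_iff_eq_take.mp (List.takeWhile_prefix _)]

-- B's list-level value equals the common characterisation
theorem pvB_eq (s : List Char) :
    (if '\n' ∈ s.takeWhile PySem.Chars.isspace
       then (s.drop ((s.takeWhile PySem.Chars.isspace).idxOf '\n' + 1))
       else s)
      = (pvG s).getD s := by
  induction s with
  | nil => simp [pvG]
  | cons c t ih =>
    by_cases hn : c = '\n'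
    · subst hn
      simp [PySem.Chars.isspace, pvG, List.idxOf_cons_self]
    · by_cases hs : PySem.Chars.isspace c
      · have htw : (c :: t).takeWhile PySem.Chars.isspace
            = c :: t.takeWhile PySem.Chars.isspace := by simp [hs]
        rw [htw]
        by_cases hm : '\n' ∈ t.takeWhile PySem.Chars.isspace
        · have hidx : (c :: t.takeWhile PySem.Chars.isspace).idxOf '\n'
              = (t.takeWhile PySem.Chars.isspace).idxOf '\n' + 1 := by
            rw [List.idxOf_cons_ne _ hn]
          have hg : pvG t ≠ none := by
            rw [Ne, pvG_eq_none_iff]; simpa using hm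
          obtain ⟨u, hu⟩ := Option.ne_none_iff_exists'.mp hg
          have hIH := ih
          rw [if_pos hm, hu] at hIH
          simp only [List.mem_cons, hm, or_true, if_pos, hidx]
          rw [List.drop_succ_cons, hIH]
          simp [pvG, hn, hs, hu]
        · have hmc : '\n' ∉ c :: t.takeWhile PySem.Chars.isspace := by
            simp [hm, Ne.symm hn]
          rw [if_neg hmc]
          have hg : pvG t = none := (pvG_eq_none_iff t).mpr hm
          simp [pvG, hn, hs, hg]
      · simp [hs, pvG, hn]

-- ===== VERDICT (by name: the statement is the Claim_ definition above) =====
theorem trim_left_until_new_line_py_spec : Claim_equal_trim_left_until_new_line_py := by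
  intro text _
  unfold Spec_trim_left_until_new_line_py trim_left_until_new_line_py trim_left_until_new_line_py_alt
  set s := text.toList with hsdef
  rw [pvAgo_eq s s.length 0 (by omega)]
  simp only [List.drop_zero]
  rw [pvPrefix_eq, pvIsIn_singleton]
  by_cases hm : '\n' ∈ s.takeWhile PySem.Chars.isspace
  · rw [if_pos (by simpa using hm)]
    rw [pvFind_singleton, if_pos hm]
    have h1 : ((s.takeWhile PySem.Chars.isspace).idxOf '\n' : Int) + 1
        = (((s.takeWhile PySem.Chars.isspace).idxOf '\n' + 1 : Nat) : Int) := by push_cast; ring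
    rw [h1, PySem.List.slice_from_natCast]
    have := pvB_eq s
    rw [if_pos hm] at this
    rw [← this]
  · rw [if_neg (by simpa using hm)]
    have := pvB_eq s
    rw [if_neg hm] at this
    rw [← this]
    exact congrArg String.ofList rfl |>.trans (by simp [hsdef])
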